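-- pv_equiv track=rewrite | github.com/duytnb79/translate-srt | rewrite_srt.py | parse_structured_summary_content
-- ===== SOURCE A (Python) =====
-- SUMMARY_SECTION_MARKERS = {
--     "summary": "[CONTEXTUAL SUMMARY]",
--     "titles": "[SUGGESTED TITLES]",
--     "description": "[SUGGESTED DESCRIPTION]"
-- }
--
-- def parse_structured_summary_content(file_content: str) -> tuple[str, list[str], str]:
--     """Parses the structured content from a summary file."""
--     summary_text = ""
--     titles_list = []
--     description_text = ""
--     current_section = None
--     for line in file_content.splitlines():
--         if line.strip() == SUMMARY_SECTION_MARKERS["summary"]: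
--             current_section = "summary"
--             continue
--         elif line.strip() == SUMMARY_SECTION_MARKERS["titles"]:
--             current_section = "titles"
--             continue
--         elif line.strip() == SUMMARY_SECTION_MARKERS["description"]:
--             current_section = "description"
--             continue
--         if current_section == "summary":
--             summary_text += line + "\n"
--         elif current_section == "titles":
--             if line.strip():
--                 cleaned_line = line.strip()
--                 if len(cleaned_line) > 2 and cleaned_line[0].isdigit() and cleaned_line[1] == '.':
--                     titles_list.append(cleaned_line[2:].strip())
--                 elif len(cleaned_line) > 1 and cleaned_line[0] == '-':
--                     titles_list.append(cleaned_line[1:].strip())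
--                 else:
--                     titles_list.append(cleaned_line)
--         elif current_section == "description":
--             description_text += line + "\n"
--     return summary_text.strip(), titles_list, description_text.strip()
-- ===== SOURCE B (Python) =====
-- # Segment-based re-implementation: first locate all marker lines and cut the
-- # file into (section, body-lines) segments, then assemble each result from its
-- # collected bodies; no per-line section state machine.
--
-- _MARKERS = {
--     "[CONTEXTUAL SUMMARY]": "summary",
--     "[SUGGESTED TITLES]": "titles",
--     "[SUGGESTED DESCRIPTION]": "description",
-- }
--
--
-- def _clean_title(c):
--     if len(c) > 2 and c[0].isdigit() and c[1] == '.':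
--         return c[2:].strip()
--     if len(c) > 1 and c[0] == '-':
--         return c[1:].strip()
--     return c
--
--
-- def _segments(lines):
--     """Cut lines at marker lines into (section, body) segments; the part
--     before the first marker belongs to no section and is dropped."""
--     i = 0
--     while i < len(lines) and lines[i].strip() not in _MARKERS:
--         i += 1
--     segs = []
--     while i < len(lines):
--         sec = _MARKERS[lines[i].strip()]
--         j = i + 1
--         while j < len(lines) and lines[j].strip() not in _MARKERS:
--             j += 1
--         segs.append((sec, lines[i + 1:j]))
--         i = j
--     return segs
--
--
-- def parse_structured_summary_content(file_content: str) -> tuple[str, list[str], str]: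
--     buckets = {"summary": [], "titles": [], "description": []}
--     for sec, body in _segments(file_content.splitlines()):
--         buckets[sec].extend(body)
--     titles = [_clean_title(t.strip()) for t in buckets["titles"] if t.strip()]
--     return ("\n".join(buckets["summary"]).strip(), titles,
--             "\n".join(buckets["description"]).strip())
-- ===== Notes on version B (the rewrite author's own statement) =====
-- stated objective: alternative
-- what changed: A is a one-pass state machine carrying current_section and mutating three accumulators per line; B first cuts the line list into (section, body) segments at the marker lines, then assembles each of the three results independently from the concatenated bodies (newline-join plus strip, comprehension for titles).
import Mathlib
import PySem

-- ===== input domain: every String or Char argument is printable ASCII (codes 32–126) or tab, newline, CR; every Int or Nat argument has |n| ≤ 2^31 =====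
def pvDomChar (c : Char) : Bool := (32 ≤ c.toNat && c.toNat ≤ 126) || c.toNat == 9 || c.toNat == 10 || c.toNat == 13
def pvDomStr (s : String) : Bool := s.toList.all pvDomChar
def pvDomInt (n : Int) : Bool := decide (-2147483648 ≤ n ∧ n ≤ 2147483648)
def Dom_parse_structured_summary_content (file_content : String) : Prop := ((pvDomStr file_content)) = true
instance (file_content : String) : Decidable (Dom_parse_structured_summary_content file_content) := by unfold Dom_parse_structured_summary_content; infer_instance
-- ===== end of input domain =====

-- B replaces A's per-line state machine (current_section, three accumulators mutated per
-- line) by a staged decomposition: cut the line list into (section, body) segments at the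
-- marker lines, then assemble the three results from the bodies; objective: alternative.

-- ===== PORT A =====
-- A's loop state: (summary_text, titles_list, description_text, current_section);
-- strings are carried as List Char (PySem.Chars is exact on the stated domain).
def pvAStep (st : List Char × List (List Char) × List Char × Option String) (line : List Char) :
    List Char × List (List Char) × List Char × Option String :=
  let s := PySem.Chars.strip line
  if s = "[CONTEXTUAL SUMMARY]".toList then (st.1, st.2.1, st.2.2.1, some "summary")
  else if s = "[SUGGESTED TITLES]".toList then (st.1, st.2.1, st.2.2.1, some "titles")
  else if s = "[SUGGESTED DESCRIPTION]".toList then (st.1, st.2.1, st.2.2.1, some "description")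
  else if st.2.2.2 = some "summary" then (st.1 ++ line ++ ['\n'], st.2.1, st.2.2.1, st.2.2.2)
  else if st.2.2.2 = some "titles" then
    if s ≠ [] then
      if 2 < s.length ∧ PySem.Chars.isdigit (s.getD 0 ' ') = true ∧ s.getD 1 ' ' = '.' then
        (st.1, st.2.1 ++ [PySem.Chars.strip (s.drop 2)], st.2.2.1, st.2.2.2)
      else if 1 < s.length ∧ s.getD 0 ' ' = '-' then
        (st.1, st.2.1 ++ [PySem.Chars.strip (s.drop 1)], st.2.2.1, st.2.2.2)
      else (st.1, st.2.1 ++ [s], st.2.2.1, st.2.2.2)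
    else st
  else if st.2.2.2 = some "description" then (st.1, st.2.1, st.2.2.1 ++ line ++ ['\n'], st.2.2.2)
  else st

def parse_structured_summary_content (file_content : String) : String × List String × String :=
  let st := (PySem.Chars.splitlines file_content.toList).foldl pvAStep ([], [], [], none)
  (String.ofList (PySem.Chars.strip st.1), st.2.1.map String.ofList, String.ofList (PySem.Chars.strip st.2.2.1))

-- ===== PORT B =====
def pvCleanTitle (c : List Char) : List Char :=
  if 2 < c.length ∧ PySem.Chars.isdigit (c.getD 0 ' ') = true ∧ c.getD 1 ' ' = '.' then
    PySem.Chars.strip (c.drop 2)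
  else if 1 < c.length ∧ c.getD 0 ' ' = '-' then PySem.Chars.strip (c.drop 1)
  else c

-- lookup in B's literal _MARKERS dict
def pvMarkerSec? (s : List Char) : Option String :=
  if s = "[CONTEXTUAL SUMMARY]".toList then some "summary"
  else if s = "[SUGGESTED TITLES]".toList then some "titles"
  else if s = "[SUGGESTED DESCRIPTION]".toList then some "description"
  else none

-- 'lines[i].strip() not in _MARKERS'
def pvNonMarker (l : List Char) : Bool := (pvMarkerSec? (PySem.Chars.strip l)).isNone

-- B's _segments: skip the preamble, then repeatedly take a marker and the body up to
-- the next marker (the while loops over suffixes become dropWhile/takeWhile + recursion).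
def pvSegments (lines : List (List Char)) : List (String × List (List Char)) :=
  if h : lines.dropWhile pvNonMarker = [] then []
  else
    let m := (lines.dropWhile pvNonMarker).head h
    let rest := (lines.dropWhile pvNonMarker).tail
    ((pvMarkerSec? (PySem.Chars.strip m)).getD "", rest.takeWhile pvNonMarker)
      :: pvSegments (rest.dropWhile pvNonMarker)
termination_by lines.length
decreasing_by
  have h1 : (List.dropWhile pvNonMarker lines).length ≤ lines.length :=
    List.length_dropWhile_le _ _
  have h2 : (List.dropWhile pvNonMarker ((List.dropWhile pvNonMarker lines).tail)).length ≤
      ((List.dropWhile pvNonMarker lines).tail).length := List.length_dropWhile_le _ _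
  have h3 : ((List.dropWhile pvNonMarker lines).tail).length <
      (List.dropWhile pvNonMarker lines).length := by
    cases hc : List.dropWhile pvNonMarker lines with
    | nil => exact absurd hc h
    | cons a b => simp
  omega

-- 'buckets[sec].extend(body)' on the dict of three buckets
def pvAddSeg (B : List (List Char) × List (List Char) × List (List Char))
    (seg : String × List (List Char)) :
    List (List Char) × List (List Char) × List (List Char) :=
  if seg.1 = "summary" then (B.1 ++ seg.2, B.2.1, B.2.2)
  else if seg.1 = "titles" then (B.1, B.2.1 ++ seg.2, B.2.2)
  else if seg.1 = "description" then (B.1, B.2.1, B.2.2 ++ seg.2)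
  else B

def parse_structured_summary_content_alt (file_content : String) : String × List String × String :=
  let B := (pvSegments (PySem.Chars.splitlines file_content.toList)).foldl pvAddSeg ([], [], [])
  let titles := B.2.1.filterMap (fun t =>
    let c := PySem.Chars.strip t
    if c = [] then none else some (pvCleanTitle c))
  (String.ofList (PySem.Chars.strip (PySem.Chars.join ['\n'] B.1)),
   titles.map String.ofList,
   String.ofList (PySem.Chars.strip (PySem.Chars.join ['\n'] B.2.2)))

-- ===== PRECONDITION & SPEC =====
def Spec_parse_structured_summary_content (file_content : String) (out : String × List String × String) : Prop := out = parse_structured_summary_content_alt file_content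
instance (file_content : String) (out : String × List String × String) : Decidable (Spec_parse_structured_summary_content file_content out) := by unfold Spec_parse_structured_summary_content; infer_instance

-- ===== CLAIM (what is proved, stated in full; the proofs are below) =====
def Claim_equal_parse_structured_summary_content : Prop := ∀ (file_content : String), Dom_parse_structured_summary_content file_content → Spec_parse_structured_summary_content file_content (parse_structured_summary_content file_content)

-- ===== LEMMAS AND PROOFS =====
-- Proof-side intermediate: a bucketed state machine; A's fold is related to it (pvRel),
-- and its bucket output equals B's segment computation.
def pvBStep (st : (List (List Char) × List (List Char) × List (List Char)) × Option String)
    (line : List Char) : (List (List Char) × List (List Char) × List (List Char)) × Option String :=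
  match pvMarkerSec? (PySem.Chars.strip line) with
  | some s => (st.1, some s)
  | none =>
    match st.2 with
    | none => st
    | some sec =>
      if sec = "summary" then ((st.1.1 ++ [line], st.1.2.1, st.1.2.2), st.2)
      else if sec = "titles" then ((st.1.1, st.1.2.1 ++ [line], st.1.2.2), st.2)
      else if sec = "description" then ((st.1.1, st.1.2.1, st.1.2.2 ++ [line]), st.2)
      else st

def pvFlat (l : List (List Char)) : List Char := (l.map (· ++ ['\n'])).flatten

def pvTitlesOf (l : List (List Char)) : List (List Char) :=
  l.filterMap (fun t =>
    let c := PySem.Chars.strip t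
    if c = [] then none else some (pvCleanTitle c))

def pvOkCur (b : Option String) : Prop :=
  b = none ∨ b = some "summary" ∨ b = some "titles" ∨ b = some "description"

def pvRel (sa : List Char × List (List Char) × List Char × Option String)
    (sb : (List (List Char) × List (List Char) × List (List Char)) × Option String) : Prop :=
  sa.1 = pvFlat sb.1.1 ∧ sa.2.1 = pvTitlesOf sb.1.2.1 ∧ sa.2.2.1 = pvFlat sb.1.2.2 ∧
    sa.2.2.2 = sb.2 ∧ pvOkCur sb.2

theorem pvFlat_append (l : List (List Char)) (x : List Char) :
    pvFlat (l ++ [x]) = pvFlat l ++ x ++ ['\n'] := by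
  simp [pvFlat]

theorem pvTitlesOf_append (l : List (List Char)) (x : List Char) :
    pvTitlesOf (l ++ [x]) = pvTitlesOf l ++
      (if PySem.Chars.strip x = [] then [] else [pvCleanTitle (PySem.Chars.strip x)]) := by
  unfold pvTitlesOf
  rw [List.filterMap_append]
  by_cases hs : PySem.Chars.strip x = [] <;> simp [hs]

theorem pvStep_rel (sa : List Char × List (List Char) × List Char × Option String)
    (sb : (List (List Char) × List (List Char) × List (List Char)) × Option String)
    (h : pvRel sa sb) (line : List Char) : pvRel (pvAStep sa line) (pvBStep sb line) := by
  obtain ⟨h1, h2, h3, h4, h5⟩ := h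
  unfold pvAStep pvBStep pvMarkerSec?
  by_cases m1 : PySem.Chars.strip line = "[CONTEXTUAL SUMMARY]".toList
  · exact ⟨by simp [m1, h1], by simp [m1, h2], by simp [m1, h3], by simp [m1], by
      simp [m1, pvOkCur]⟩
  · by_cases m2 : PySem.Chars.strip line = "[SUGGESTED TITLES]".toList
    · exact ⟨by simp [m1, m2, h1], by simp [m1, m2, h2], by simp [m1, m2, h3],
        by simp [m1, m2], by simp [m1, m2, pvOkCur]⟩
    · by_cases m3 : PySem.Chars.strip line = "[SUGGESTED DESCRIPTION]".toList
      · exact ⟨by simp [m1, m2, m3, h1], by simp [m1, m2, m3, h2], by simp [m1, m2, m3, h3],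
          by simp [m1, m2, m3], by simp [m1, m2, m3, pvOkCur]⟩
      · simp only [if_neg m1, if_neg m2, if_neg m3]
        rcases h5 with hb | hb | hb | hb
        · simp only [h4, hb, reduceCtorEq, if_false]
          exact ⟨h1, h2, h3, by rw [h4, hb], by simp [hb, pvOkCur]⟩
        · simp only [h4, hb, Option.some.injEq, String.reduceEq, if_true, ite_false]
          exact ⟨by simp [h1, pvFlat_append], by simpa using h2, by simpa using h3,
            by simp, by simp [pvOkCur]⟩
        · simp only [h4, hb, Option.some.injEq, String.reduceEq, ite_false, ite_true]
          refine ⟨?_, ?_, ?_, ?_, ?_⟩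
          · by_cases hs : PySem.Chars.strip line = [] <;> first | (split_ifs <;> simp_all) | simp_all
          · by_cases hs : PySem.Chars.strip line = []
            · simp only [hs, ne_eq, not_true_eq_false, if_false]
              rw [h2, pvTitlesOf_append, if_pos hs, List.append_nil]
            · simp only [hs, ne_eq, not_false_iff, if_true]
              split_ifs with hc1 hc2
              · simp only [h2, pvTitlesOf_append, if_neg hs, pvCleanTitle, if_pos hc1]
              · simp only [h2, pvTitlesOf_append, if_neg hs, pvCleanTitle, if_neg hc1,
                  if_pos hc2]
              · simp only [h2, pvTitlesOf_append, if_neg hs, pvCleanTitle, if_neg hc1,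
                  if_neg hc2]
          · by_cases hs : PySem.Chars.strip line = [] <;> first | (split_ifs <;> simp_all) | simp_all
          · by_cases hs : PySem.Chars.strip line = [] <;> first | (split_ifs <;> simp_all) | simp_all
          · by_cases hs : PySem.Chars.strip line = [] <;>
              first | (split_ifs <;> simp_all [pvOkCur]) | simp_all [pvOkCur]
        · simp only [h4, hb, Option.some.injEq, String.reduceEq, if_true, ite_false]
          exact ⟨by simpa using h1, by simpa using h2, by simp [h3, pvFlat_append],
            by simp, by simp [pvOkCur]⟩

theorem pvFold_rel (lines : List (List Char))
    (sa : List Char × List (List Char) × List Char × Option String)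
    (sb : (List (List Char) × List (List Char) × List (List Char)) × Option String)
    (h : pvRel sa sb) : pvRel (lines.foldl pvAStep sa) (lines.foldl pvBStep sb) := by
  induction lines generalizing sa sb with
  | nil => exact h
  | cons l ls ih => exact ih _ _ (pvStep_rel sa sb h l)

-- preamble: non-marker lines are no-ops while the section is none
theorem pvFold_dropPre (lines : List (List Char))
    (B : List (List Char) × List (List Char) × List (List Char)) :
    lines.foldl pvBStep (B, none) = (lines.dropWhile pvNonMarker).foldl pvBStep (B, none) := by
  induction lines with
  | nil => rfl
  | cons l ls ih =>
    by_cases hm : pvNonMarker l = true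
    · have hstep : pvBStep (B, none) l = (B, none) := by
        unfold pvBStep
        have : pvMarkerSec? (PySem.Chars.strip l) = none := by
          simpa [pvNonMarker, Option.isNone_iff_eq_none] using hm
        simp [this]
      simp [List.dropWhile, hm, List.foldl_cons, hstep, ih]
    · simp [List.dropWhile, hm]

-- a body of non-marker lines extends exactly the current bucket
theorem pvFold_body (body : List (List Char)) (sec : String)
    (B : List (List Char) × List (List Char) × List (List Char))
    (hall : ∀ l ∈ body, pvNonMarker l = true)
    (hsec : sec = "summary" ∨ sec = "titles" ∨ sec = "description") :
    body.foldl pvBStep (B, some sec) = (pvAddSeg B (sec, body), some sec) := by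
  induction body generalizing B with
  | nil => rcases hsec with h | h | h <;> simp [pvAddSeg, h]
  | cons l ls ih =>
    have hl : pvMarkerSec? (PySem.Chars.strip l) = none := by
      simpa [pvNonMarker, Option.isNone_iff_eq_none] using hall l (by simp)
    have hls : ∀ x ∈ ls, pvNonMarker x = true := fun x hx => hall x (by simp [hx])
    have hstep : pvBStep (B, some sec) l = (pvAddSeg B (sec, [l]), some sec) := by
      rcases hsec with h | h | h <;> subst h <;>
        simp [pvBStep, hl, pvAddSeg]
    rw [List.foldl_cons, hstep]
    rcases hsec with h | h | h <;> subst h <;>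
      rw [ih _ hls] <;> simp [pvAddSeg]

-- starting at a marker (or the end), the initial section does not matter for the buckets
theorem pvFold_startMarker (tail : List (List Char))
    (B : List (List Char) × List (List Char) × List (List Char)) (c c' : Option String)
    (h : tail = [] ∨ ∃ m rest, tail = m :: rest ∧ pvNonMarker m = false) :
    (tail.foldl pvBStep (B, c)).1 = (tail.foldl pvBStep (B, c')).1 := by
  rcases h with h | ⟨m, rest, hm, hnm⟩
  · simp [h]
  · obtain ⟨s, hs⟩ : ∃ s, pvMarkerSec? (PySem.Chars.strip m) = some s := by
      cases hx : pvMarkerSec? (PySem.Chars.strip m) with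
      | none => simp [pvNonMarker, hx] at hnm
      | some s => exact ⟨s, rfl⟩
    subst hm
    simp [List.foldl_cons, pvBStep, hs]

theorem pvDropWhile_shape (lines : List (List Char)) :
    lines.dropWhile pvNonMarker = [] ∨
      ∃ m rest, lines.dropWhile pvNonMarker = m :: rest ∧ pvNonMarker m = false := by
  cases h : lines.dropWhile pvNonMarker with
  | nil => exact Or.inl rfl
  | cons m rest =>
    exact Or.inr ⟨m, rest, rfl, by
      have := List.head_dropWhile_not (p := pvNonMarker) (l := lines) (by simp [h])
      simpa [h] using this⟩

-- the bucket state machine computes exactly B's segment-fold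
theorem pvFold_segments (lines : List (List Char))
    (B : List (List Char) × List (List Char) × List (List Char)) :
    (lines.foldl pvBStep (B, none)).1 = (pvSegments lines).foldl pvAddSeg B := by
  rw [pvFold_dropPre]
  rcases h : lines.dropWhile pvNonMarker with _ | ⟨m, rest⟩
  · rw [pvSegments, dif_pos h]; rfl
  · have hm : pvNonMarker m = false := by
      rcases pvDropWhile_shape lines with h0 | ⟨m', r', he, hf⟩
      · simp [h] at h0
      · rw [h] at he; cases he; exact hf
    obtain ⟨s, hs⟩ : ∃ s, pvMarkerSec? (PySem.Chars.strip m) = some s := by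
      cases hx : pvMarkerSec? (PySem.Chars.strip m) with
      | none => simp [pvNonMarker, hx] at hm
      | some s => exact ⟨s, rfl⟩
    have hsec : s = "summary" ∨ s = "titles" ∨ s = "description" := by
      unfold pvMarkerSec? at hs
      split_ifs at hs <;> simp_all
    have hall : ∀ l ∈ rest.takeWhile pvNonMarker, pvNonMarker l = true :=
      fun l hl => List.mem_takeWhile_imp hl
    rw [pvSegments, dif_neg (by simp [h])]
    simp only [h, List.head_cons, List.tail_cons, hs, Option.getD_some]
    have hstepm : pvBStep (B, none) m = (B, some s) := by
      unfold pvBStep; rw [hs]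
    rw [List.foldl_cons, hstepm]
    have hre : rest.foldl pvBStep (B, some s) =
        (rest.takeWhile pvNonMarker ++ rest.dropWhile pvNonMarker).foldl pvBStep (B, some s) := by
      rw [List.takeWhile_append_dropWhile]
    rw [hre, List.foldl_append, pvFold_body _ _ _ hall hsec, List.foldl_cons]
    rw [pvFold_startMarker (rest.dropWhile pvNonMarker) _ (some s) none
      (by
        rcases pvDropWhile_shape rest with h0 | ⟨m', r', he, hf⟩
        · exact Or.inl h0
        · exact Or.inr ⟨m', r', he, hf⟩)]
    exact pvFold_segments (rest.dropWhile pvNonMarker) (pvAddSeg B (s, rest.takeWhile pvNonMarker))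
termination_by lines.length
decreasing_by
  have h1 : (List.dropWhile pvNonMarker lines).length ≤ lines.length :=
    List.length_dropWhile_le _ _
  have h2 : (List.dropWhile pvNonMarker rest).length ≤ rest.length :=
    List.length_dropWhile_le _ _
  have h3 : (m :: rest).length = rest.length + 1 := by simp
  rw [h] at h1
  omega

theorem pv_isspace_nl : PySem.Chars.isspace '\n' = true := by decide

theorem pvRstrip_append_nl (x : List Char) :
    PySem.Chars.rstrip (x ++ ['\n']) = PySem.Chars.rstrip x := by
  simp [PySem.Chars.rstrip, pv_isspace_nl]

theorem pvStrip_append_nl (x : List Char) :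
    PySem.Chars.strip (x ++ ['\n']) = PySem.Chars.strip x := by
  unfold PySem.Chars.strip PySem.Chars.lstrip
  rw [List.dropWhile_append]
  split
  · next he =>
    have : List.dropWhile PySem.Chars.isspace x = [] := by simpa using he
    simp [this, List.dropWhile, pv_isspace_nl, PySem.Chars.rstrip]
  · exact pvRstrip_append_nl _

theorem pvStrip_flat (l : List (List Char)) :
    PySem.Chars.strip (pvFlat l) = PySem.Chars.strip (PySem.Chars.join ['\n'] l) := by
  induction l with
  | nil => rfl
  | cons x xs ih =>
    cases xs with
    | nil => simp [pvFlat, PySem.Chars.join, pvStrip_append_nl, List.intercalate]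
    | cons y ys =>
      have key : ∀ (zs : List (List Char)), zs ≠ [] → pvFlat zs = PySem.Chars.join ['\n'] zs ++ ['\n'] := by
        intro zs
        induction zs with
        | nil => simp
        | cons a bs ihz =>
          intro _
          cases bs with
          | nil => simp [pvFlat, PySem.Chars.join, List.intercalate]
          | cons b cs =>
            have := ihz (by simp)
            simp only [pvFlat, List.map_cons, List.flatten_cons] at this ⊢
            rw [this]
            simp [PySem.Chars.join, List.intercalate]
      rw [key _ (by simp), pvStrip_append_nl]

-- ===== VERDICT (by name: the statement is the Claim_ definition above) =====
theorem parse_structured_summary_content_spec : Claim_equal_parse_structured_summary_content := by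
  intro file_content _
  unfold Spec_parse_structured_summary_content parse_structured_summary_content
    parse_structured_summary_content_alt
  have h := pvFold_rel (PySem.Chars.splitlines file_content.toList)
    ([], [], [], none) (([], [], []), none) (by simp [pvRel, pvFlat, pvTitlesOf, pvOkCur])
  obtain ⟨h1, h2, h3, _, _⟩ := h
  have hseg := pvFold_segments (PySem.Chars.splitlines file_content.toList) ([], [], [])
  simp only [h1, h2, h3, hseg, pvStrip_flat, pvTitlesOf]
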